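-- pv_equiv track=rewrite | github.com/Sahil-Garg-01/TrialBalance_To_Notes | app/new_main.py | categorize_accounts
-- ===== SOURCE A (Python) =====
-- from typing import Dict, List, Any, Optional
--
-- def categorize_accounts(accounts: List[Dict[str, Any]], note_number: str) -> Dict[str, List[Dict[str, Any]]]:
--     """Categorize accounts based on note-specific rules"""
--     categories = {
--         "prepaid_expenses": [],
--         "other_advances": [],
--         "advance_tax": [],
--         "statutory_balances": [],
--         "uncategorized": []
--     } if note_number == "14" else {}
--
--     for account in accounts:
--         account_name = account.get("account_name", "").lower()
--         categorized = False
--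
--         if note_number == "14":
--             if "prepaid" in account_name:
--                 categories["prepaid_expenses"].append(account)
--                 categorized = True
--             elif any(word in account_name for word in ["advance tax", "tax advance", "income tax"]):
--                 categories["advance_tax"].append(account)
--                 categorized = True
--             elif any(word in account_name for word in ["tds", "gst", "statutory", "government", "vat", "pf", "esi"]):
--                 categories["statutory_balances"].append(account)
--                 categorized = True
--             elif any(word in account_name for word in ["advance", "deposit", "recoverable", "employee advance", "supplier advance"]):
--                 categories["other_advances"].append(account)
--                 categorized = True
--
--             if not categorized:
--                 categories["uncategorized"].append(account)
--
--     return categories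
-- ===== SOURCE B (Python) =====
-- # Table-driven re-implementation: ordered rule table + per-account label, output built per category.
-- _RULES = [
--     ("prepaid_expenses", ["prepaid"]),
--     ("advance_tax", ["advance tax", "tax advance", "income tax"]),
--     ("statutory_balances", ["tds", "gst", "statutory", "government", "vat", "pf", "esi"]),
--     ("other_advances", ["advance", "deposit", "recoverable", "employee advance", "supplier advance"]),
-- ]
-- _KEYS = ["prepaid_expenses", "other_advances", "advance_tax", "statutory_balances", "uncategorized"]
--
--
-- def _label(account):
--     name = account.get("account_name", "").lower()
--     return next((cat for cat, words in _RULES if any(w in name for w in words)), "uncategorized")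
--
--
-- def categorize_accounts(accounts, note_number):
--     if note_number != "14":
--         return {}
--     return {cat: [a for a in accounts if _label(a) == cat] for cat in _KEYS}
-- ===== Notes on version B (the rewrite author's own statement) =====
-- stated objective: simpler
-- what changed: The branch cascade mutating a pre-built dict becomes an ordered rule table with a first-match label function, and the result is a dict comprehension grouping accounts per category instead of in-place appends inside the loop.
import Mathlib
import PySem

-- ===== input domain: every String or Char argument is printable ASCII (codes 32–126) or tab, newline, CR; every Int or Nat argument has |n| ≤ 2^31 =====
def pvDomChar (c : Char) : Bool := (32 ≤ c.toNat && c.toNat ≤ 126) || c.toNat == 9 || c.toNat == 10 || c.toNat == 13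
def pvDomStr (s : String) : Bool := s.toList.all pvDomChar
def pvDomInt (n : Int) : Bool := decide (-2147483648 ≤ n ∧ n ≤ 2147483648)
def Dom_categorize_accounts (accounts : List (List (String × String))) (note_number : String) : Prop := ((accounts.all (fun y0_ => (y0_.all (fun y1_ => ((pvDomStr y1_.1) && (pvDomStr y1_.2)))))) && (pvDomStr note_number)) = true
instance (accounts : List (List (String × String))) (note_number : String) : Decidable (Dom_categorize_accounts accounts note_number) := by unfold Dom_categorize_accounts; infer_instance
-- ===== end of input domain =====

-- B replaces A's branch cascade over a mutated dict by an ordered rule table with a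
-- first-match label function and a per-category grouping comprehension (objective: simpler).

-- ===== PORT A =====
-- one iteration of A's for-loop, with the 'categorized' flag carried explicitly
def pvStepA (note_number : String) (d : PySem.Dict String (List (List (String × String)))) (account : List (String × String)) : PySem.Dict String (List (List (String × String))) :=
  let account_name := PySem.Str.lower ((PySem.Dict.mk account).getD "account_name" "")
  let categorized := false
  if note_number == "14" then
    let (d, categorized) :=
      if PySem.Str.isIn "prepaid" account_name then
        (d.modify "prepaid_expenses" [] (· ++ [account]), true)
      else if ["advance tax", "tax advance", "income tax"].any (fun w => PySem.Str.isIn w account_name) then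
        (d.modify "advance_tax" [] (· ++ [account]), true)
      else if ["tds", "gst", "statutory", "government", "vat", "pf", "esi"].any (fun w => PySem.Str.isIn w account_name) then
        (d.modify "statutory_balances" [] (· ++ [account]), true)
      else if ["advance", "deposit", "recoverable", "employee advance", "supplier advance"].any (fun w => PySem.Str.isIn w account_name) then
        (d.modify "other_advances" [] (· ++ [account]), true)
      else (d, categorized)
    if !categorized then d.modify "uncategorized" [] (· ++ [account]) else d
  else d

def categorize_accounts (accounts : List (List (String × String))) (note_number : String) : List (String × List (List (String × String))) :=
  let categories : PySem.Dict String (List (List (String × String))) :=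
    if note_number == "14" then
      PySem.Dict.mk [("prepaid_expenses", []), ("other_advances", []), ("advance_tax", []), ("statutory_balances", []), ("uncategorized", [])]
    else PySem.Dict.empty
  (accounts.foldl (pvStepA note_number) categories).items

-- ===== PORT B =====
def pvRulesB : List (String × List String) :=
  [("prepaid_expenses", ["prepaid"]),
   ("advance_tax", ["advance tax", "tax advance", "income tax"]),
   ("statutory_balances", ["tds", "gst", "statutory", "government", "vat", "pf", "esi"]),
   ("other_advances", ["advance", "deposit", "recoverable", "employee advance", "supplier advance"])]

def pvKeysB : List String :=
  ["prepaid_expenses", "other_advances", "advance_tax", "statutory_balances", "uncategorized"]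

def pvLabelB (account : List (String × String)) : String :=
  let name := PySem.Str.lower ((PySem.Dict.mk account).getD "account_name" "")
  ((pvRulesB.find? (fun r => r.2.any (fun w => PySem.Str.isIn w name))).map (fun r => r.1)).getD "uncategorized"

def categorize_accounts_alt (accounts : List (List (String × String))) (note_number : String) : List (String × List (List (String × String))) :=
  if note_number == "14" then
    pvKeysB.map (fun c => (c, accounts.filter (fun a => pvLabelB a == c)))
  else []

-- ===== PRECONDITION & SPEC =====
def Spec_categorize_accounts (accounts : List (List (String × String))) (note_number : String) (out : List (String × List (List (String × String)))) : Prop := out = categorize_accounts_alt accounts note_number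
instance (accounts : List (List (String × String))) (note_number : String) (out : List (String × List (List (String × String)))) : Decidable (Spec_categorize_accounts accounts note_number out) := by unfold Spec_categorize_accounts; infer_instance

-- ===== CLAIM (what is proved, stated in full; the proofs are below) =====
def Claim_equal_categorize_accounts : Prop := ∀ (accounts : List (List (String × String))) (note_number : String), Dom_categorize_accounts accounts note_number → Spec_categorize_accounts accounts note_number (categorize_accounts accounts note_number)

-- ===== LEMMAS AND PROOFS =====

-- A's loop step is exactly 'append the account at its label'
set_option maxHeartbeats 3200000 in
lemma stepA_eq (d : PySem.Dict String (List (List (String × String)))) (a : List (String × String)) :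
    pvStepA "14" d a = d.modify (pvLabelB a) [] (· ++ [a]) := by
  unfold pvStepA pvLabelB
  simp only [pvRulesB, List.find?, List.any_cons, List.any_nil, Bool.or_false, beq_self_eq_true,
    if_pos]
  repeat' split
  all_goals try simp_all only []
  all_goals simp_all

lemma labelB_mem (a : List (String × String)) : pvLabelB a ∈ pvKeysB := by
  simp only [pvLabelB]
  cases h : pvRulesB.find? (fun r => r.2.any (fun w => PySem.Str.isIn w (PySem.Str.lower ((PySem.Dict.mk a).getD "account_name" "")))) with
  | none => simp [pvKeysB]

  | some r =>
    have hr := List.mem_of_find?_eq_some h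
    simp only [pvRulesB, List.mem_cons, List.not_mem_nil, or_false] at hr
    rcases hr with rfl | rfl | rfl | rfl <;> simp [pvKeysB]

theorem categorize_accounts_spec : Claim_equal_categorize_accounts := by
  intro accounts note_number hdom
  unfold Spec_categorize_accounts categorize_accounts categorize_accounts_alt
  by_cases hn : note_number = "14"
  · subst hn
    simp only [beq_self_eq_true, if_pos]
    have hfold :
        accounts.foldl (pvStepA "14")
          (PySem.Dict.mk [("prepaid_expenses", []), ("other_advances", []), ("advance_tax", []), ("statutory_balances", []), ("uncategorized", [])])
        = (accounts.map (fun a => (pvLabelB a, a))).foldl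
            (fun d p => d.modify p.1 [] (· ++ [p.2]))
            (PySem.Dict.mk [("prepaid_expenses", []), ("other_advances", []), ("advance_tax", []), ("statutory_balances", []), ("uncategorized", [])]) := by
      rw [List.foldl_map]
      exact List.foldl_ext _ _ _ (fun d a _ => stepA_eq d a)
    rw [hfold]
    set d0 : PySem.Dict String (List (List (String × String))) :=
      PySem.Dict.mk [("prepaid_expenses", []), ("other_advances", []), ("advance_tax", []), ("statutory_balances", []), ("uncategorized", [])] with hd0
    set l := accounts.map (fun a => (pvLabelB a, a)) with hl
    set res := l.foldl (fun d p => d.modify p.1 [] (· ++ [p.2])) d0 with hres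
    have hkeys : res.keys = pvKeysB := by
      have h1 : res.keys = PySem.Set.update d0.keys (l.map (·.1)) :=
        PySem.Dict.keys_foldl_modify_key l (·.1) [] (fun d p v => v ++ [p.2]) d0
      rw [h1, PySem.Set.update_eq_append_filter]
      have hfil : (PySem.Set.ofList (l.map (·.1))).filter (fun y => !(PySem.Set.contains d0.keys y)) = [] := by
        apply List.filter_eq_nil_iff.mpr
        intro y hy
        have hyl : y ∈ l.map (·.1) := (PySem.Set.mem_ofList _ _).mp hy
        simp only [hl, List.map_map, List.mem_map, Function.comp_def] at hyl
        obtain ⟨a, _, ha⟩ := hyl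
        have hmem : y ∈ pvKeysB := by rw [← ha]; exact labelB_mem a
        have hk : d0.keys = pvKeysB := by rw [hd0]; decide
        simp [hk, hmem]
      rw [hfil, List.append_nil]
      decide
    have hnodup : res.keys.Nodup := by rw [hkeys]; decide
    have hitems : res.items = res.keys.map (fun k => (k, res.getD k [])) :=
      PySem.Dict.items_eq_map_keys res hnodup []
    have hgetD : ∀ c, c ∈ pvKeysB → res.getD c [] = accounts.filter (fun a => pvLabelB a == c) := by
      intro c hc
      rw [hres, hl, PySem.Dict.getD_foldl_modify_append]
      have hd0c : d0.getD c [] = [] := by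
        simp only [pvKeysB, List.mem_cons, List.not_mem_nil, or_false] at hc
        rcases hc with rfl | rfl | rfl | rfl | rfl <;> decide
      rw [hd0c, List.nil_append, List.filter_map, List.map_map]
      simp [Function.comp_def]
    rw [hitems, hkeys]
    apply List.map_congr_left
    intro c hc
    rw [hgetD c hc]
  · have hb : (note_number == "14") = false := by simp [hn]
    simp only [hb, Bool.false_eq_true, if_false]
    clear hdom
    have hid : accounts.foldl (pvStepA note_number) PySem.Dict.empty = PySem.Dict.empty := by
      induction accounts with
      | nil => rfl
      | cons a xs ih =>
        have hstep : pvStepA note_number PySem.Dict.empty a = PySem.Dict.empty := by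
          unfold pvStepA; simp [hb]
        simp only [List.foldl_cons, hstep, ih]
    rw [hid]; rfl
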